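-- pv_equiv track=rewrite | github.com/sagemath/sagewiki_to_gh-2022-10-10 | Days9Projects/ChristoffelWord.py | ChristoffelWord
-- ===== SOURCE A (Python) =====
-- def ChristoffelWord(p, q):
--     if p<0:
--         return ChristoffelWord(-p,q).replace('A','a')
--     elif q<0:
--         return ChristoffelWord(p,-q).replace('B','b')
--
--     # Compute the Christoffel word
--     w = ''
--     u = 0
--     if p == 0:
--         w = 'a'*q
--     else:
--         for i in range(p + q):
--             v = (u+p) % (p+q)
--             if u < v:
--                 new_letter = 'a'
--             else:
--                 new_letter = 'b'
--             w += new_letter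
--             u = v
--     return w
-- ===== SOURCE B (Python) =====
-- def ChristoffelWord(p, q):
--     p, q = abs(p), abs(q)
--     N = p + q
--     return ''.join('a' if (i + 1) * p // N == i * p // N else 'b' for i in range(N))
-- ===== Notes on version B (the rewrite author's own statement) =====
-- stated objective: simpler
-- what changed: Replaces the running-remainder accumulator loop (plus the special p==0 branch and the sign-flipping recursion with no-op replace calls) by a single direct per-index formula: letter i is 'a' exactly when floor((i+1)p/N) == floor(ip/N) with N=p+q, applied to |p|,|q|.
import Mathlib
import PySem

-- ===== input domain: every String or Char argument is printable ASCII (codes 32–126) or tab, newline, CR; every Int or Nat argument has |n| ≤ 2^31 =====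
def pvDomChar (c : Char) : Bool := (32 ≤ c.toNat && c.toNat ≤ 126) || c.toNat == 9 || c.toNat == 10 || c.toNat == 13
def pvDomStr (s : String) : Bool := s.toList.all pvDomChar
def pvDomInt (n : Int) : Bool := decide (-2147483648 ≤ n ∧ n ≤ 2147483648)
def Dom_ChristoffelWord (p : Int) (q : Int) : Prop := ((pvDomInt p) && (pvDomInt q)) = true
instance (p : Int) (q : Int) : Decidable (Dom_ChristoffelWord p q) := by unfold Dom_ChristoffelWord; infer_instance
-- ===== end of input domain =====

-- B replaces A's running-remainder accumulator loop (and its special p == 0 branch and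
-- sign-flipping recursion) by a direct per-index floor formula on |p|, |q|; same cost, simpler.

-- ===== PORT A =====
-- Literal port of A.  'w += new_letter' is ported as list append on the accumulated
-- List Char (String.ofList at the end); 'a'*q for q : Int is PySem.List.pyRepeat on ['a'].
def ChristoffelWord (p : Int) (q : Int) : String :=
  if p < 0 then PySem.Str.replace (ChristoffelWord (-p) q) "A" "a"
  else if q < 0 then PySem.Str.replace (ChristoffelWord p (-q)) "B" "b"
  else if p = 0 then String.ofList (PySem.List.pyRepeat ['a'] q)
  else
    String.ofList
      (((PySem.List.pyRange 0 (p + q) 1).foldl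
          (fun (st : List Char × Int) _i =>
            let v := PySem.Int.mod (st.2 + p) (p + q)
            let newLetter := if st.2 < v then 'a' else 'b'
            (st.1 ++ [newLetter], v))
          ([], 0)).1)
termination_by ((if p < 0 then 1 else 0) + (if q < 0 then 1 else 0) : Nat)
decreasing_by
  all_goals (split_ifs <;> omega)

-- ===== PORT B =====
def ChristoffelWord_alt (p : Int) (q : Int) : String :=
  let pa := |p|
  let qa := |q|
  let N := pa + qa
  String.ofList
    ((PySem.List.pyRange 0 N 1).map (fun i =>
      if PySem.Int.floordiv ((i + 1) * pa) N = PySem.Int.floordiv (i * pa) N then 'a' else 'b'))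

-- ===== PRECONDITION & SPEC =====
def Spec_ChristoffelWord (p : Int) (q : Int) (out : String) : Prop := out = ChristoffelWord_alt p q
instance (p : Int) (q : Int) (out : String) : Decidable (Spec_ChristoffelWord p q out) := by unfold Spec_ChristoffelWord; infer_instance

-- ===== CLAIM (what is proved, stated in full; the proofs are below) =====
def Claim_equal_ChristoffelWord : Prop := ∀ (p : Int) (q : Int), Dom_ChristoffelWord p q → Spec_ChristoffelWord p q (ChristoffelWord p q)

-- ===== LEMMAS AND PROOFS =====

-- (x + k*N) / N = k when 0 ≤ x < N.
lemma cw_ediv_shift (x k N : Int) (hN : 0 < N) (h0 : 0 ≤ x) (hx : x < N) :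
    (x + k * N) / N = k := by
  rw [Int.add_mul_ediv_right _ _ (by omega : N ≠ 0), Int.ediv_eq_zero_of_lt h0 hx, zero_add]

-- A's chained remainder equals the remainder of the next multiple.
lemma cw_mod_chain (p N a : Int) (hN : 0 < N) :
    PySem.Int.mod (PySem.Int.mod (a * p) N + p) N = PySem.Int.mod ((a + 1) * p) N := by
  rw [PySem.Int.mod_eq_emod_of_pos hN, PySem.Int.mod_eq_emod_of_pos hN,
      PySem.Int.mod_eq_emod_of_pos hN, Int.emod_add_emod]
  ring_nf

-- The per-step heart: with 0 < p ≤ N, A's wrap test 'u < v' (u = a*p % N, v = (u+p) % N)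
-- holds exactly when B's two floors at index a are equal.
lemma cw_step_iff (p N a : Int) (hp : 0 < p) (hpN : p ≤ N) :
    (PySem.Int.mod (a * p) N < PySem.Int.mod ((a + 1) * p) N ↔
      PySem.Int.floordiv ((a + 1) * p) N = PySem.Int.floordiv (a * p) N) := by
  have hN : 0 < N := lt_of_lt_of_le hp hpN
  rw [PySem.Int.mod_eq_emod_of_pos hN, PySem.Int.mod_eq_emod_of_pos hN,
      PySem.Int.floordiv_eq_ediv_of_pos hN, PySem.Int.floordiv_eq_ediv_of_pos hN]
  set u := (a * p) % N with hu
  set k := (a * p) / N with hk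
  have hu0 : 0 ≤ u := Int.emod_nonneg _ (by omega)
  have huN : u < N := Int.emod_lt_of_pos _ hN
  have hdiv : k * N + u = a * p := by rw [hu, hk]; exact Int.ediv_mul_add_emod (a * p) N
  by_cases hlt : u + p < N
  · have he : (a + 1) * p = (u + p) + k * N := by
      have h1 : (a + 1) * p = a * p + p := by ring
      linarith [hdiv, h1]
    have hq : ((a + 1) * p) / N = k := by rw [he]; exact cw_ediv_shift _ _ _ hN (by omega) hlt
    have hm : ((a + 1) * p) % N = u + p := by
      have := Int.ediv_mul_add_emod ((a + 1) * p) N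
      rw [hq] at this; linarith [he, this]
    rw [hm, hq]; constructor <;> intro _ <;> omega
  · have he : (a + 1) * p = (u + p - N) + (k + 1) * N := by
      have h1 : (a + 1) * p = a * p + p := by ring
      have h2 : (u + p - N) + (k + 1) * N = u + p + k * N := by ring
      linarith [hdiv, h1, h2]
    have hq : ((a + 1) * p) / N = k + 1 := by
      rw [he]; exact cw_ediv_shift _ _ _ hN (by omega) (by omega)
    have hm : ((a + 1) * p) % N = u + p - N := by
      have := Int.ediv_mul_add_emod ((a + 1) * p) N
      rw [hq] at this
      have h2 : (k + 1) * N = k * N + N := by ring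
      linarith [he, this, h2]
    rw [hm, hq]; constructor <;> intro h <;> omega

-- A's loop over range(a, N) starting from remainder a*p % N appends exactly B's letters.
lemma cw_loop (p q : Int) (hp : 0 < p) (hq : 0 ≤ q) :
    ∀ (n : Nat) (a : Int), 0 ≤ a → a + n = p + q → ∀ (w : List Char),
      ((PySem.List.pyRange a (p + q) 1).foldl
          (fun (st : List Char × Int) _i =>
            let v := PySem.Int.mod (st.2 + p) (p + q)
            let newLetter := if st.2 < v then 'a' else 'b'
            (st.1 ++ [newLetter], v))
          (w, PySem.Int.mod (a * p) (p + q))).1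
        = w ++ (PySem.List.pyRange a (p + q) 1).map (fun i =>
            if PySem.Int.floordiv ((i + 1) * p) (p + q) = PySem.Int.floordiv (i * p) (p + q)
            then 'a' else 'b') := by
  have hN : 0 < p + q := by omega
  intro n
  induction n with
  | zero =>
    intro a _ hend w
    rw [PySem.List.pyRange_one_eq_nil (by omega)]
    simp
  | succ m ih =>
    intro a ha hend w
    rw [PySem.List.pyRange_one_cons (by omega : a < p + q)]
    simp only [List.foldl_cons, List.map_cons]
    rw [cw_mod_chain p (p + q) a hN]
    have hstep := cw_step_iff p (p + q) a hp (by omega)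
    have hletter :
        (if PySem.Int.mod (a * p) (p + q) < PySem.Int.mod ((a + 1) * p) (p + q) then 'a' else 'b')
          = (if PySem.Int.floordiv ((a + 1) * p) (p + q) = PySem.Int.floordiv (a * p) (p + q)
             then 'a' else 'b') := by
      by_cases h : PySem.Int.mod (a * p) (p + q) < PySem.Int.mod ((a + 1) * p) (p + q)
      · rw [if_pos h, if_pos (hstep.mp h)]
      · rw [if_neg h, if_neg (fun hc => h (hstep.mpr hc))]
    rw [hletter]
    have := ih (a + 1) (by omega) (by omega)
      (w ++ [if PySem.Int.floordiv ((a + 1) * p) (p + q) = PySem.Int.floordiv (a * p) (p + q)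
             then 'a' else 'b'])
    simpa using this

-- The nonnegative core case: for 0 ≤ p, 0 ≤ q the two ports agree.
lemma cw_nonneg (p q : Int) (hp : 0 ≤ p) (hq : 0 ≤ q) :
    ChristoffelWord p q = ChristoffelWord_alt p q := by
  rw [ChristoffelWord]
  rw [if_neg (by omega : ¬ p < 0), if_neg (by omega : ¬ q < 0)]
  unfold ChristoffelWord_alt
  rw [abs_of_nonneg hp, abs_of_nonneg hq]
  by_cases hp0 : p = 0
  · rw [if_pos hp0]
    subst hp0
    rw [PySem.List.pyRepeat_singleton]
    congr 1
    simp [List.map_const', PySem.List.length_pyRange_one]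
  · rw [if_neg hp0]
    have hppos : 0 < p := by omega
    congr 1
    have h0 : (0 : Int) = PySem.Int.mod (0 * p) (p + q) := by
      rw [PySem.Int.mod_eq_emod_of_pos (by omega)]; simp
    calc ((PySem.List.pyRange 0 (p + q) 1).foldl
            (fun (st : List Char × Int) _i =>
              let v := PySem.Int.mod (st.2 + p) (p + q)
              let newLetter := if st.2 < v then 'a' else 'b'
              (st.1 ++ [newLetter], v))
            ([], 0)).1
        = ((PySem.List.pyRange 0 (p + q) 1).foldl
            (fun (st : List Char × Int) _i =>
              let v := PySem.Int.mod (st.2 + p) (p + q)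
              let newLetter := if st.2 < v then 'a' else 'b'
              (st.1 ++ [newLetter], v))
            ([], PySem.Int.mod (0 * p) (p + q))).1 := by rw [← h0]
      _ = [] ++ (PySem.List.pyRange 0 (p + q) 1).map (fun i =>
            if PySem.Int.floordiv ((i + 1) * p) (p + q) = PySem.Int.floordiv (i * p) (p + q)
            then 'a' else 'b') :=
          cw_loop p q hppos hq (p + q).toNat 0 le_rfl (by omega) []
      _ = _ := by simp

-- Every letter of B's word is 'a' or 'b'.
lemma cw_alt_chars (p q : Int) (c : Char) (h : c ∈ (ChristoffelWord_alt p q).toList) :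
    c = 'a' ∨ c = 'b' := by
  unfold ChristoffelWord_alt at h
  rw [String.toList_ofList] at h
  rcases List.mem_map.mp h with ⟨i, _, hi⟩
  by_cases hc : PySem.Int.floordiv ((i + 1) * |p|) (|p| + |q|) = PySem.Int.floordiv (i * |p|) (|p| + |q|)
  · left; rw [← hi, if_pos hc]
  · right; rw [← hi, if_neg hc]

-- replace.go is the identity when the single-character pattern does not occur.
lemma cw_go_noop (ch : Char) (new : List Char) :
    ∀ (fuel : Nat) (l acc : List Char), ch ∉ l →
      PySem.Chars.replace.go [ch] new fuel l acc = acc.reverse ++ l := by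
  intro fuel
  induction fuel with
  | zero => intro l acc _; rw [PySem.Chars.replace.go]
  | succ n ih =>
    intro l acc h
    cases l with
    | nil => simp [PySem.Chars.replace.go]
    | cons c t =>
      rw [PySem.Chars.replace.go]
      have hne : (List.isPrefixOf [ch] (c :: t)) = false := by
        simp [List.isPrefixOf]
        intro he; exact absurd (he ▸ List.mem_cons_self) h
      rw [hne]
      simp only [Bool.false_eq_true, if_false]
      rw [ih t (c :: acc) (fun hm => h (List.mem_cons_of_mem _ hm))]
      simp

-- s.replace(old, new) = s when old is a single character absent from s.
lemma cw_replace_noop (s old new : String) (c : Char) (hold : old.toList = [c])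
    (h : c ∉ s.toList) : PySem.Str.replace s old new = s := by
  unfold PySem.Str.replace PySem.Chars.replace
  rw [hold]
  rw [if_neg (by simp)]
  rw [cw_go_noop c new.toList s.toList.length s.toList [] h]
  simp [String.ofList_toList]

-- ===== VERDICT (by name: the statement is the Claim_ definition above) =====
set_option maxHeartbeats 1000000 in
theorem ChristoffelWord_spec : Claim_equal_ChristoffelWord := by
  unfold Claim_equal_ChristoffelWord Spec_ChristoffelWord
  intro p q _
  by_cases hp : p < 0
  · by_cases hq : q < 0
    · rw [ChristoffelWord, if_pos hp]
      rw [ChristoffelWord, if_neg (by omega : ¬ (-p : Int) < 0), if_pos hq]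
      rw [cw_nonneg (-p) (-q) (by omega) (by omega)]
      rw [cw_replace_noop (ChristoffelWord_alt (-p) (-q)) "B" "b" 'B' rfl
        (fun hm => by rcases cw_alt_chars (-p) (-q) 'B' hm with h | h <;> simp at h)]
      rw [cw_replace_noop (ChristoffelWord_alt (-p) (-q)) "A" "a" 'A' rfl
        (fun hm => by rcases cw_alt_chars (-p) (-q) 'A' hm with h | h <;> simp at h)]
      unfold ChristoffelWord_alt
      rw [abs_neg, abs_neg]
    · rw [ChristoffelWord, if_pos hp]
      rw [cw_nonneg (-p) q (by omega) (by omega)]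
      rw [cw_replace_noop (ChristoffelWord_alt (-p) q) "A" "a" 'A' rfl
        (fun hm => by rcases cw_alt_chars (-p) q 'A' hm with h | h <;> simp at h)]
      unfold ChristoffelWord_alt
      rw [abs_neg]
  · by_cases hq : q < 0
    · rw [ChristoffelWord, if_neg hp, if_pos hq]
      rw [cw_nonneg p (-q) (by omega) (by omega)]
      rw [cw_replace_noop (ChristoffelWord_alt p (-q)) "B" "b" 'B' rfl
        (fun hm => by rcases cw_alt_chars p (-q) 'B' hm with h | h <;> simp at h)]
      unfold ChristoffelWord_alt
      rw [abs_neg]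
    · exact cw_nonneg p q (by omega) (by omega)
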